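-- pv_equiv track=rewrite | github.com/Azure/azure-cli | src/azure-cli-core/azure/cli/core/style.py | highlight_command
-- ===== SOURCE A (Python) =====
-- from enum import Enum
--
-- class Style(str, Enum):
--     PRIMARY = "primary"
--     SECONDARY = "secondary"
--     IMPORTANT = "important"
--     ACTION = "action"  # name TBD
--     HYPERLINK = "hyperlink"
--     # Message colors
--     ERROR = "error"
--     SUCCESS = "success"
--     WARNING = "warning"
--
-- def highlight_command(raw_command):
--     """Highlight a command with colors.
--
--     For example, for
--
--         az group create --name myrg --location westus
--
--     The command name 'az group create', argument name '--name', '--location' are marked as ACTION style.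
--     The argument value 'myrg' and 'westus' are marked as PRIMARY style.
--     If the argument is provided as '--location=westus', it will be marked as PRIMARY style.
--
--     :param raw_command: The command that needs to be highlighted.
--     :type raw_command: str
--     :return: The styled command text.
--     :rtype: list
--     """
--
--     styled_command = []
--     argument_begins = False
--
--     for index, arg in enumerate(raw_command.split()):
--         spaced_arg = ' {}'.format(arg) if index > 0 else arg
--         style = Style.PRIMARY
--
--         if arg.startswith('-') and '=' not in arg:
--             style = Style.ACTION
--             argument_begins = True
--         elif not argument_begins and '=' not in arg:
--             style = Style.ACTION
--
--         styled_command.append((style, spaced_arg))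
--
--     return styled_command
-- ===== SOURCE B (Python) =====
-- from enum import Enum
--
--
-- class Style(str, Enum):
--     PRIMARY = "primary"
--     SECONDARY = "secondary"
--     IMPORTANT = "important"
--     ACTION = "action"  # name TBD
--     HYPERLINK = "hyperlink"
--     ERROR = "error"
--     SUCCESS = "success"
--     WARNING = "warning"
--
--
-- def highlight_command(raw_command):
--     tokens = raw_command.split()
--
--     # First pass: boundary = index of the first token that starts with '-'
--     # and contains no '=' (the first real flag); len(tokens) if there is none.
--     boundary = len(tokens)
--     for i, tok in enumerate(tokens):
--         if tok.startswith('-') and '=' not in tok: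
--             boundary = i
--             break
--
--     # Second pass: classify by position relative to the boundary.
--     styled_command = []
--     for i, tok in enumerate(tokens):
--         if i < boundary:
--             style = Style.ACTION if '=' not in tok else Style.PRIMARY
--         else:
--             style = Style.ACTION if tok.startswith('-') and '=' not in tok else Style.PRIMARY
--         styled_command.append((style, ' ' + tok if i > 0 else tok))
--     return styled_command
-- ===== Notes on version B (the rewrite author's own statement) =====
-- stated objective: alternative
-- what changed: Replaces the single-pass mutable latch (argument_begins) with a two-pass scheme: first find the boundary index of the first dash flag that carries no equals sign, then classify each token purely by its position relative to that boundary.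
import Mathlib
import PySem

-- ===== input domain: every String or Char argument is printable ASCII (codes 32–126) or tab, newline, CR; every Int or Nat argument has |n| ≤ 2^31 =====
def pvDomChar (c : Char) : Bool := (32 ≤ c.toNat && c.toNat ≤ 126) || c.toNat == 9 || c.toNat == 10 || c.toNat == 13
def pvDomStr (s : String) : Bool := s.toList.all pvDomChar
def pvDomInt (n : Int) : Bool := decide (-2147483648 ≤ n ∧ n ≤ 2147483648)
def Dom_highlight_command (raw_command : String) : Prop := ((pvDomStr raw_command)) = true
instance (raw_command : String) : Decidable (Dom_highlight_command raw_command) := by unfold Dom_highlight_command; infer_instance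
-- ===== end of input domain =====

-- B replaces A's single-pass mutable latch by a boundary index found in a first pass
-- plus a purely positional classification in a second pass (objective: alternative).
-- Styles are ported as their string values ("action" / "primary").

-- ===== PORT A =====
-- one loop step of A: state = (styled_command, argument_begins)
def hcA_step (st : List (String × String) × Bool) (p : Int × String) :
    List (String × String) × Bool :=
  let spaced_arg := if p.1 > 0 then " " ++ p.2 else p.2
  if PySem.Str.startswith p.2 "-" && !(PySem.Str.isIn "=" p.2) then
    (st.1 ++ [("action", spaced_arg)], true)
  else if !st.2 && !(PySem.Str.isIn "=" p.2) then
    (st.1 ++ [("action", spaced_arg)], st.2)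
  else
    (st.1 ++ [("primary", spaced_arg)], st.2)

def highlight_command (raw_command : String) : List (String × String) :=
  ((PySem.List.enumerate (PySem.Str.split₀ raw_command) 0).foldl hcA_step ([], false)).1

-- ===== PORT B =====
-- first pass of B: index of the first dash-flag-without-'=' token, or the length
def hcB_boundary : List String → Nat
  | [] => 0
  | tok :: ts =>
      if PySem.Str.startswith tok "-" && !(PySem.Str.isIn "=" tok) then 0
      else 1 + hcB_boundary ts

def highlight_command_alt (raw_command : String) : List (String × String) :=
  let tokens := PySem.Str.split₀ raw_command
  let boundary := hcB_boundary tokens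
  (PySem.List.enumerate tokens 0).foldl
    (fun acc p =>
      let style :=
        if p.1 < (boundary : Int) then
          (if !(PySem.Str.isIn "=" p.2) then "action" else "primary")
        else
          (if PySem.Str.startswith p.2 "-" && !(PySem.Str.isIn "=" p.2) then "action" else "primary")
      acc ++ [(style, if p.1 > 0 then " " ++ p.2 else p.2)]) []

-- ===== PRECONDITION & SPEC =====
def Spec_highlight_command (raw_command : String) (out : List (String × String)) : Prop := out = highlight_command_alt raw_command
instance (raw_command : String) (out : List (String × String)) : Decidable (Spec_highlight_command raw_command out) := by unfold Spec_highlight_command; infer_instance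

-- ===== CLAIM (what is proved, stated in full; the proofs are below) =====
def Claim_equal_highlight_command : Prop := ∀ (raw_command : String), Dom_highlight_command raw_command → Spec_highlight_command raw_command (highlight_command raw_command)

-- ===== LEMMAS AND PROOFS =====

-- A's per-token style once the latch is set
def hcAfter (tok : String) : String :=
  if PySem.Str.startswith tok "-" && !(PySem.Str.isIn "=" tok) then "action" else "primary"

-- A's per-token style while the latch is unset
def hcBefore (tok : String) : String :=
  if !(PySem.Str.isIn "=" tok) then "action" else "primary"

def hcSpaced (i : Int) (tok : String) : String := if i > 0 then " " ++ tok else tok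

theorem hc_fst_ge {α : Type} {ts : List α} {n : Int} {p : Int × α}
    (hp : p ∈ PySem.List.enumerate ts n) : n ≤ p.1 := by
  have h1 : p.1 ∈ (PySem.List.enumerate ts n).map (·.1) := List.mem_map_of_mem hp
  rw [PySem.List.map_fst_enumerate] at h1
  exact (PySem.List.mem_pyRange_one.mp h1).1

-- once the latch is true it stays true and every token is classified by hcAfter
theorem hcA_loop_true (ts : List String) : ∀ (n : Int) (acc : List (String × String)),
    (PySem.List.enumerate ts n).foldl hcA_step (acc, true) =
      (acc ++ (PySem.List.enumerate ts n).map (fun p => (hcAfter p.2, hcSpaced p.1 p.2)), true) := by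
  induction ts with
  | nil => intro n acc; simp [PySem.List.enumerate_nil]
  | cons t ts ih =>
      intro n acc
      rw [PySem.List.enumerate_cons]
      simp only [List.foldl_cons, List.map_cons]
      by_cases h : PySem.Chars.startswith t.toList ['-'] = true ∧
          PySem.Chars.isIn ['='] t.toList = false
      · simp [hcA_step, hcAfter, hcSpaced, h, ih]
      · simp [hcA_step, hcAfter, hcSpaced, h, ih]

-- with the latch unset, classification is positional w.r.t. the boundary
theorem hcA_loop_false (ts : List String) : ∀ (n : Int) (acc : List (String × String)),
    ((PySem.List.enumerate ts n).foldl hcA_step (acc, false)).1 =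
      acc ++ (PySem.List.enumerate ts n).map
        (fun p => (if p.1 - n < (hcB_boundary ts : Int) then hcBefore p.2 else hcAfter p.2,
                   hcSpaced p.1 p.2)) := by
  induction ts with
  | nil => intro n acc; simp [PySem.List.enumerate_nil]
  | cons t ts ih =>
      intro n acc
      rw [PySem.List.enumerate_cons]
      simp only [List.foldl_cons, List.map_cons]
      by_cases h : PySem.Chars.startswith t.toList ['-'] = true ∧
          PySem.Chars.isIn ['='] t.toList = false
      · -- latch fires: boundary = 0, head is "action", tail uses hcA_loop_true
        have hb : hcB_boundary (t :: ts) = 0 := by simp [hcB_boundary, h]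
        rw [hb]
        have hstep : hcA_step (acc, false) (n, t) =
            (acc ++ [("action", hcSpaced n t)], true) := by
          simp [hcA_step, hcSpaced, h]
        rw [hstep, hcA_loop_true]
        have hhead : (if (n : Int) - n < ((0 : Nat) : Int) then hcBefore t else hcAfter t)
            = "action" := by
          rw [if_neg (by omega)]; simp [hcAfter, h]
        have htail : (PySem.List.enumerate ts (n + 1)).map
            (fun p => (if p.1 - n < ((0 : Nat) : Int) then hcBefore p.2 else hcAfter p.2,
                       hcSpaced p.1 p.2)) =
            (PySem.List.enumerate ts (n + 1)).map
            (fun p => (hcAfter p.2, hcSpaced p.1 p.2)) := by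
          apply List.map_congr_left
          intro p hp
          have := hc_fst_ge hp
          rw [if_neg (by omega)]
        rw [htail, hhead]
        simp
      · -- latch stays unset: boundary = 1 + boundary ts, head is hcBefore
        have hb : hcB_boundary (t :: ts) = 1 + hcB_boundary ts := by simp [hcB_boundary, h]
        rw [hb]
        have hstep : hcA_step (acc, false) (n, t) =
            (acc ++ [(hcBefore t, hcSpaced n t)], false) := by
          by_cases he : PySem.Chars.isIn ['='] t.toList = true
          · simp [hcA_step, hcBefore, hcSpaced, he]
          · have hs : PySem.Chars.startswith t.toList ['-'] = false := by
              cases hsb : PySem.Chars.startswith t.toList ['-'] with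
              | false => rfl
              | true => exact absurd ⟨hsb, by simpa using he⟩ h
            simp [hcA_step, hcBefore, hcSpaced, he, hs]
        rw [hstep, ih]
        have hhead : (if (n : Int) - n < ((1 + hcB_boundary ts : Nat) : Int) then hcBefore t
            else hcAfter t) = hcBefore t := by
          rw [if_pos (by push_cast; omega)]
        have htail : (PySem.List.enumerate ts (n + 1)).map
            (fun p => (if p.1 - (n + 1) < (hcB_boundary ts : Int) then hcBefore p.2 else hcAfter p.2,
                       hcSpaced p.1 p.2)) =
            (PySem.List.enumerate ts (n + 1)).map
            (fun p => (if p.1 - n < ((1 + hcB_boundary ts : Nat) : Int) then hcBefore p.2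
                       else hcAfter p.2, hcSpaced p.1 p.2)) := by
          apply List.map_congr_left
          intro p _
          by_cases hc : p.1 - (n + 1) < (hcB_boundary ts : Int)
          · rw [if_pos hc, if_pos (by push_cast at hc ⊢; omega)]
          · rw [if_neg hc, if_neg (by push_cast at hc ⊢; omega)]
        rw [htail, hhead]
        simp

-- B's fold is the same map
theorem hcB_eq_map (raw_command : String) :
    highlight_command_alt raw_command =
      (PySem.List.enumerate (PySem.Str.split₀ raw_command) 0).map
        (fun p => (if p.1 - 0 < (hcB_boundary (PySem.Str.split₀ raw_command) : Int)
                   then hcBefore p.2 else hcAfter p.2, hcSpaced p.1 p.2)) := by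
  unfold highlight_command_alt
  rw [PySem.List.foldl_append_singleton_eq_map]
  apply List.map_congr_left
  intro p _
  by_cases hc : p.1 < (hcB_boundary (PySem.Str.split₀ raw_command) : Int) <;>
    simp [hcBefore, hcAfter, hcSpaced, hc]

-- ===== VERDICT (by name: the statement is the Claim_ definition above) =====
theorem highlight_command_spec : Claim_equal_highlight_command := by
  intro raw_command _
  show highlight_command raw_command = highlight_command_alt raw_command
  rw [hcB_eq_map]
  unfold highlight_command
  rw [hcA_loop_false]
  simp
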